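-- pv_equiv track=rewrite | github.com/sowwnn/KickStart | 2019/RoundA/Tranning.py | Solution
-- ===== SOURCE A (Python) =====
-- def Solution(p,line):
--     line.sort()
--     pre = [0]
--     sum = 0
--     res = 1000000000000
--     for i in range(0,len(line)):
--         sum+= line[i]
--         pre.append(sum)
--     for i in range(p-1,len(line)):
--         res = min(res,p*line[i] - (pre[i + 1] - pre[i -p +1 ]))
--     return res
-- ===== SOURCE B (Python) =====
-- def Solution(p, line):
--     line.sort()
--     res = 1000000000000
--     if 1 <= p <= len(line):
--         window = sum(line[:p])
--         res = min(res, p * line[p - 1] - window)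
--         for i in range(p, len(line)):
--             window += line[i] - line[i - p]
--             res = min(res, p * line[i] - window)
--     return res
-- ===== Notes on version B (the rewrite author's own statement) =====
-- stated objective: alternative
-- what changed: Replaced A's prefix-sum array (a second O(n) table indexed twice per step) by a single running window sum updated in O(1) per step, with an explicit feasibility guard 1 <= p <= len(line) instead of relying on an empty range.
-- outside the precondition, e.g. on Solution(0, [5]): A returns 0, B returns 1000000000000
import Mathlib
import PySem

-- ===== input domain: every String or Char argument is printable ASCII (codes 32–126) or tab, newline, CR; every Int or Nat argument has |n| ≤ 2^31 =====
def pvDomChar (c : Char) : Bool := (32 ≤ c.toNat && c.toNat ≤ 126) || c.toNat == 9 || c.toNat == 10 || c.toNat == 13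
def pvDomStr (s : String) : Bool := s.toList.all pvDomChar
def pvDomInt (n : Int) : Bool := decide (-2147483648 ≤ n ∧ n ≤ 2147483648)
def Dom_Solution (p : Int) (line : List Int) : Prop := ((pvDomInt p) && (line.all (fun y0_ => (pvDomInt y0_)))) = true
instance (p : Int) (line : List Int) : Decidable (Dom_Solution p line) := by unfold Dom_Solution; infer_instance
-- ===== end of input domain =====

-- B replaces A's prefix-sum array by a single O(1)-space running window sum with an explicit
-- feasibility guard (alternative decomposition, same asymptotic cost). Both Pythons sort `line`
-- in place (the equivalence proved here is about the return value; the mutation is identical).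

-- ===== PORT A =====
def Solution (p : Int) (line : List Int) : Int :=
  let line := PySem.List.sorted line (fun x => x) false
  let st := (PySem.List.pyRange 0 (line.length : Int) 1).foldl
      (fun (st : List Int × Int) i =>
        let sum := st.2 + PySem.List.pyGetD line i 0
        (st.1 ++ [sum], sum)) ([0], 0)
  let pre := st.1
  (PySem.List.pyRange (p - 1) (line.length : Int) 1).foldl
      (fun res i =>
        min res (p * PySem.List.pyGetD line i 0
          - (PySem.List.pyGetD pre (i + 1) 0 - PySem.List.pyGetD pre (i - p + 1) 0)))
      1000000000000

-- ===== PORT B =====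
def Solution_alt (p : Int) (line : List Int) : Int :=
  let line := PySem.List.sorted line (fun x => x) false
  let res : Int := 1000000000000
  if 1 ≤ p ∧ p ≤ (line.length : Int) then
    let window := (PySem.List.slice line none (some p)).sum
    let res := min res (p * PySem.List.pyGetD line (p - 1) 0 - window)
    let st := (PySem.List.pyRange p (line.length : Int) 1).foldl
      (fun (st : Int × Int) i =>
        let window := st.1 + PySem.List.pyGetD line i 0 - PySem.List.pyGetD line (i - p) 0
        (window, min st.2 (p * PySem.List.pyGetD line i 0 - window))) (window, res)
    st.2
  else res

-- ===== PRECONDITION & SPEC =====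
-- Pre_ excludes p ≤ -1 (A raises IndexError) and p = 0 (A raises on the empty list; on a
-- nonempty list A's value arises from negative-index wraparound on a degenerate zero-width
-- window, a corner no caller of this contest routine specifies).
def Pre_Solution (p : Int) (line : List Int) : Prop := 1 ≤ p
instance (p : Int) (line : List Int) : Decidable (Pre_Solution p line) := by unfold Pre_Solution; infer_instance
def pvWitness_Solution : Int × List Int := (2, [3, 1, 4])

def Spec_Solution (p : Int) (line : List Int) (out : Int) : Prop := out = Solution_alt p line
instance (p : Int) (line : List Int) (out : Int) : Decidable (Spec_Solution p line out) := by unfold Spec_Solution; infer_instance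

-- ===== CLAIM (what is proved, stated in full; the proofs are below) =====
def Claim_equal_Solution : Prop := ∀ (p : Int) (line : List Int), Dom_Solution p line → Pre_Solution p line → Spec_Solution p line (Solution p line)

-- ===== LEMMAS AND PROOFS =====

-- closed form of A's prefix-sum-building loop
lemma pv_fold_pre (s : List Int) (acc : List Int) (c : Int) :
    s.foldl (fun (st : List Int × Int) x => (st.1 ++ [st.2 + x], st.2 + x)) (acc, c)
      = (acc ++ (List.range s.length).map (fun k => c + (s.take (k+1)).sum), c + s.sum) := by
  induction s generalizing acc c with
  | nil => simp
  | cons x t ih =>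
    simp only [List.foldl_cons]
    rw [ih]
    simp [List.range_succ_eq_map, List.map_map, Function.comp, add_assoc]
-- reading A's pre table at an in-range nonnegative index is a take-sum
lemma pv_pre_get (s : List Int) (j : Int) (h0 : 0 ≤ j) (hj : j ≤ (s.length : Int)) :
    PySem.List.pyGetD (0 :: (List.range s.length).map (fun k => 0 + (s.take (k+1)).sum)) j 0
      = (s.take j.toNat).sum := by
  have hj' : j = ((j.toNat : Nat) : Int) := by omega
  rw [hj', PySem.List.pyGetD_natCast]
  cases hk : j.toNat with
  | zero => simp
  | succ k =>
    have hkn : k < s.length := by omega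
    simp [List.getD, hkn]
-- B's sliding-window loop computes A's fold of take-sum differences
lemma pv_loop (s : List Int) (q : Nat) (hq : 1 ≤ q) :
    ∀ (m a : Nat) (r : Int), q ≤ a → s.length - a = m →
    ((PySem.List.pyRange (a : Int) (s.length : Int) 1).foldl
        (fun (st : Int × Int) i =>
          (st.1 + PySem.List.pyGetD s i 0 - PySem.List.pyGetD s (i - (q : Int)) 0,
           min st.2 ((q : Int) * PySem.List.pyGetD s i 0
             - (st.1 + PySem.List.pyGetD s i 0 - PySem.List.pyGetD s (i - (q : Int)) 0))))
        (((s.take a).sum - (s.take (a - q)).sum), r)).2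
      = (PySem.List.pyRange (a : Int) (s.length : Int) 1).foldl
          (fun res i => min res ((q : Int) * PySem.List.pyGetD s i 0
            - ((s.take (i + 1).toNat).sum - (s.take (i - (q : Int) + 1).toNat).sum))) r := by
  intro m
  induction m with
  | zero =>
    intro a r hqa hm
    rw [PySem.List.pyRange_one_eq_nil (by omega)]
    simp
  | succ m ih =>
    intro a r hqa hm
    have han : a < s.length := by omega
    rw [PySem.List.pyRange_one_cons (by exact_mod_cast han)]
    simp only [List.foldl_cons]
    have hga : PySem.List.pyGetD s (a : Int) 0 = s[a] :=
      PySem.List.pyGetD_eq_getElem _ 0 (by omega) (by exact_mod_cast han)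
    have hgaq : PySem.List.pyGetD s ((a : Int) - (q : Int)) 0 = s[a - q] := by
      have h1 : (a : Int) - (q : Int) = ((a - q : Nat) : Int) := by omega
      rw [h1]
      exact PySem.List.pyGetD_eq_getElem _ 0 (by omega) (by simp; omega)
    have hw : (s.take a).sum - (s.take (a - q)).sum + PySem.List.pyGetD s (a:Int) 0
        - PySem.List.pyGetD s ((a:Int) - (q:Int)) 0
        = (s.take (a+1)).sum - (s.take (a+1 - q)).sum := by
      rw [hga, hgaq, List.sum_take_succ s a han]
      have : a + 1 - q = (a - q) + 1 := by omega
      rw [this, List.sum_take_succ s (a - q) (by omega)]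
      ring
    rw [hw]
    have hcast : (a : Int) + 1 = ((a + 1 : Nat) : Int) := by omega
    have htn1 : ((a : Int) + 1).toNat = a + 1 := by omega
    have htn2 : ((a : Int) - (q : Int) + 1).toNat = a + 1 - q := by omega
    rw [htn1, htn2, hcast, ih (a+1) _ (by omega) (by omega)]

-- the two ports agree for every p ≥ 1
theorem pv_main (p : Int) (line : List Int) (hp : 1 ≤ p) :
    Solution p line = Solution_alt p line := by
  unfold Solution Solution_alt
  simp only []
  rw [PySem.List.foldl_pyRange_zero_pyGetD' _ 0
    (fun (st : List Int × Int) v => (st.1 ++ [st.2 + v], st.2 + v)) ([0], 0)]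
  rw [pv_fold_pre]
  simp only [List.singleton_append]
  set s := PySem.List.sorted line (fun x => x) false with hs
  clear_value s
  by_cases hpn : p ≤ (s.length : Int)
  · rw [if_pos ⟨hp, hpn⟩]
    obtain ⟨q, rfl⟩ : ∃ q : Nat, p = (q : Int) := ⟨p.toNat, by omega⟩
    have hq1 : 1 ≤ q := by omega
    have hqn : q ≤ s.length := by omega
    -- A: peel the first iteration i = q-1
    rw [PySem.List.pyRange_one_cons (a := (q:Int) - 1) (by omega)]
    simp only [List.foldl_cons]
    have e1 : (q:Int) - 1 + 1 = ((q:Nat) : Int) := by omega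
    have e0 : (q:Int) - 1 - (q:Int) + 1 = ((0:Nat) : Int) := by omega
    rw [e1, e0, pv_pre_get s _ (by omega) (by omega), pv_pre_get s _ (by omega) (by omega)]
    -- A: rewrite remaining fold body to take-sums
    rw [PySem.List.foldl_congr_mem _ _
      (fun res i => min res ((q : Int) * PySem.List.pyGetD s i 0
        - ((s.take (i + 1).toNat).sum - (s.take (i - (q : Int) + 1).toNat).sum))) _
      (by
        intro acc x hx
        rw [PySem.List.mem_pyRange_one] at hx
        rw [pv_pre_get s _ (by omega) (by omega), pv_pre_get s _ (by omega) (by omega)])]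
    -- B: slice is take
    rw [PySem.List.slice_to _ (by omega)]
    -- align initial window and apply the loop lemma
    rw [← pv_loop s q hq1 (s.length - q) q _ (le_refl q) rfl]
    simp
  · rw [if_neg (by omega)]
    rw [PySem.List.pyRange_one_eq_nil (by omega)]
    simp

-- ===== VERDICT (by name: the statement is the Claim_ definition above) =====
theorem Solution_spec : Claim_equal_Solution := by
  intro p line _ hpre
  unfold Spec_Solution
  exact pv_main p line hpre
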